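-- pv_equiv track=rewrite | github.com/SeBin-Kwon/TIL | 프로그래머스/lv1/42840. 모의고사/모의고사.py | solution
-- ===== SOURCE A (Python) =====
-- def solution(answers):
--     answer = []
--     a = [1,2,3,4,5]
--     b = [2,1,2,3,2,4,2,5]
--     c = [3,3,1,1,2,2,4,4,5,5]
--
--     a_n = (10000 // len(a))
--     b_n = (10000 // len(b))
--     c_n = (10000 // len(c))
--
--     a_l = a * a_n
--     b_l = b * b_n
--     c_l = c * c_n
--
--     a_cnt = 0
--     b_cnt = 0
--     c_cnt = 0
--
--     for i in range(len(answers)):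
--         if answers[i] == a_l[i]:
--             a_cnt += 1
--         if answers[i] == b_l[i]:
--             b_cnt += 1
--         if answers[i] == c_l[i]:
--             c_cnt += 1
--
--     if max(a_cnt,b_cnt,c_cnt) == a_cnt:
--         answer.append(1)
--     if max(a_cnt,b_cnt,c_cnt) == b_cnt:
--         answer.append(2)
--     if max(a_cnt,b_cnt,c_cnt) == c_cnt:
--         answer.append(3)
--
--     return answer
-- ===== SOURCE B (Python) =====
-- def solution(answers):
--     # One pass: histogram keyed by (position mod 40, value). 40 = lcm(5, 8, 10),
--     # so every pattern's value at position i depends only on i % 40.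
--     freq = {}
--     for i, v in enumerate(answers):
--         k = (i % 40, v)
--         freq[k] = freq.get(k, 0) + 1
--     patterns = [[1, 2, 3, 4, 5],
--                 [2, 1, 2, 3, 2, 4, 2, 5],
--                 [3, 3, 1, 1, 2, 2, 4, 4, 5, 5]]
--     # Score each pattern with 40 histogram lookups (independent of len(answers)).
--     scores = [sum(freq.get((r, p[r % len(p)]), 0) for r in range(40))
--               for p in patterns]
--     best = max(scores)
--     return [k + 1 for k, s in enumerate(scores) if s == best]
-- ===== Notes on version B (the rewrite author's own statement) =====
-- stated objective: alternative
-- what changed: B replaces A's per-element comparison against three materialized 10000-long pattern lists by a single pass building a (position mod 40, value) histogram (40 = lcm of the pattern periods) and then scores each pattern with 40 dictionary lookups, independent of the input length.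
import Mathlib
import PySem

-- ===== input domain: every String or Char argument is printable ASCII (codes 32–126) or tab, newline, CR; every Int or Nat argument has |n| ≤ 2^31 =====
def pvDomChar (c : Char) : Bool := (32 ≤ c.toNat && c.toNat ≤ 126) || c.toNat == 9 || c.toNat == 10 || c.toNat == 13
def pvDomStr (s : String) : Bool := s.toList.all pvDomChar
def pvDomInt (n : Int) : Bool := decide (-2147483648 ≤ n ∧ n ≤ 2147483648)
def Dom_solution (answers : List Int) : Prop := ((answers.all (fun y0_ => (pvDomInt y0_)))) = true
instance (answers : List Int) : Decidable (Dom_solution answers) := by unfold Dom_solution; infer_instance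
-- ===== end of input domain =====

-- B replaces A's per-element comparison against three materialized 10000-long pattern
-- lists by one pass building a (position mod 40, value) histogram (40 = lcm of the
-- pattern periods), then 40 dictionary lookups per pattern (objective: alternative).

-- ===== PORT A =====
def solution (answers : List Int) : List Int :=
  let a : List Int := [1, 2, 3, 4, 5]
  let b : List Int := [2, 1, 2, 3, 2, 4, 2, 5]
  let c : List Int := [3, 3, 1, 1, 2, 2, 4, 4, 5, 5]
  let a_n : Int := PySem.Int.floordiv 10000 (a.length : Int)
  let b_n : Int := PySem.Int.floordiv 10000 (b.length : Int)
  let c_n : Int := PySem.Int.floordiv 10000 (c.length : Int)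
  let a_l : List Int := (List.replicate a_n.toNat a).flatten
  let b_l : List Int := (List.replicate b_n.toNat b).flatten
  let c_l : List Int := (List.replicate c_n.toNat c).flatten
  -- the three counters of A's single loop, as a triple; pyGetD is exact under Pre_ (indices in range)
  let cnts : Int × Int × Int :=
    (PySem.List.pyRange 0 (answers.length : Int) 1).foldl
      (fun (s : Int × Int × Int) i =>
        (if PySem.List.pyGetD answers i 0 = PySem.List.pyGetD a_l i 0 then s.1 + 1 else s.1,
         if PySem.List.pyGetD answers i 0 = PySem.List.pyGetD b_l i 0 then s.2.1 + 1 else s.2.1,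
         if PySem.List.pyGetD answers i 0 = PySem.List.pyGetD c_l i 0 then s.2.2 + 1 else s.2.2))
      (0, 0, 0)
  let m : Int := max cnts.1 (max cnts.2.1 cnts.2.2)
  (if m = cnts.1 then [1] else []) ++ (if m = cnts.2.1 then [2] else []) ++
    (if m = cnts.2.2 then [3] else [])

-- ===== PORT B =====
-- the histogram loop: for i, v in enumerate(answers): k = (i % 40, v); freq[k] = freq.get(k, 0) + 1
def pvFreq (answers : List Int) : PySem.Dict (Int × Int) Int :=
  (PySem.List.enumerate answers).foldl
    (fun d iv =>
      d.insert (PySem.Int.mod iv.1 40, iv.2) (d.getD (PySem.Int.mod iv.1 40, iv.2) 0 + 1))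
    PySem.Dict.empty

-- sum(freq.get((r, p[r % len(p)]), 0) for r in range(40))
def pvScoreB (freq : PySem.Dict (Int × Int) Int) (p : List Int) : Int :=
  ((PySem.List.pyRange 0 40 1).map
    (fun r => freq.getD (r, PySem.List.pyGetD p (PySem.Int.mod r (p.length : Int)) 0) 0)).sum

def solution_alt (answers : List Int) : List Int :=
  let freq := pvFreq answers
  let patterns : List (List Int) :=
    [[1, 2, 3, 4, 5], [2, 1, 2, 3, 2, 4, 2, 5], [3, 3, 1, 1, 2, 2, 4, 4, 5, 5]]
  let scores : List Int := patterns.map (pvScoreB freq)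
  let best : Int := ((PySem.List.max? scores id).getD 0)
  (PySem.List.enumerate scores).filterMap
    (fun is => if is.2 = best then some (is.1 + 1) else none)

-- ===== PRECONDITION & SPEC =====
-- On answers longer than 10000 A raises IndexError (its repeated pattern lists have
-- exactly 10000 elements); exactly those inputs are excluded.
def Pre_solution (answers : List Int) : Prop := answers.length ≤ 10000
instance (answers : List Int) : Decidable (Pre_solution answers) := by unfold Pre_solution; infer_instance
def pvWitness_solution : List Int := ([1, 3, 2, 4, 2])

def Spec_solution (answers : List Int) (out : List Int) : Prop := out = solution_alt answers
instance (answers : List Int) (out : List Int) : Decidable (Spec_solution answers out) := by unfold Spec_solution; infer_instance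

-- ===== CLAIM (what is proved, stated in full; the proofs are below) =====
def Claim_equal_solution : Prop := ∀ (answers : List Int), Dom_solution answers → Pre_solution answers → Spec_solution answers (solution answers)

-- ===== LEMMAS AND PROOFS =====

-- proof-side cyclic score: the common value both ports compute, per pattern
def pvScore (answers : List Int) (p : List Int) : Int :=
  ((PySem.List.enumerate answers).map
    (fun iv => if iv.2 = PySem.List.pyGetD p (PySem.Int.mod iv.1 (p.length : Int)) 0
               then (1 : Int) else 0)).sum

lemma pv_flat_getD (p : List Int) (d : Int) (k : Nat) :
    ∀ i : Nat, i < k * p.length →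
      ((List.replicate k p).flatten).getD i d = p.getD (i % p.length) d := by
  induction k with
  | zero => intro i hi; omega
  | succ k ih =>
    intro i hi
    have hmul : (k + 1) * p.length = k * p.length + p.length := by ring
    rw [List.replicate_succ, List.flatten_cons]
    by_cases h : i < p.length
    · rw [List.getD_append _ _ _ _ h, Nat.mod_eq_of_lt h]
    · obtain ⟨j, rfl⟩ : ∃ j, i = p.length + j := ⟨i - p.length, by omega⟩
      rw [List.getD_append_right _ _ _ _ (by omega)]
      simp only [Nat.add_sub_cancel_left, Nat.add_mod_left]
      exact ih j (by omega)

lemma pv_getD_append_lt (xs : List Int) (x : Int) (i : Int) (h0 : 0 ≤ i) (h : i < (xs.length : Int)) :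
    PySem.List.pyGetD (xs ++ [x]) i 0 = PySem.List.pyGetD xs i 0 := by
  rw [PySem.List.pyGetD_of_nonneg _ _ h0, PySem.List.pyGetD_of_nonneg _ _ h0]
  exact List.getD_append _ _ _ _ (by omega)

lemma pv_getD_append_last (xs : List Int) (x : Int) :
    PySem.List.pyGetD (xs ++ [x]) ((xs.length : Int)) 0 = x := by
  rw [PySem.List.pyGetD_natCast]
  rw [List.getD_append_right _ _ _ _ (le_refl _)]
  simp

lemma pv_enum_append (xs : List Int) (x : Int) :
    ∀ s : Int, PySem.List.enumerate (xs ++ [x]) s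
      = PySem.List.enumerate xs s ++ [(s + (xs.length : Int), x)] := by
  induction xs with
  | nil => intro s; simp [PySem.List.enumerate_cons, PySem.List.enumerate_nil]
  | cons y ys ih =>
    intro s
    rw [List.cons_append, PySem.List.enumerate_cons, PySem.List.enumerate_cons, ih (s + 1)]
    simp [add_comm, add_left_comm]

lemma pv_score_append (xs : List Int) (x : Int) (p : List Int) :
    pvScore (xs ++ [x]) p
      = pvScore xs p
        + (if x = PySem.List.pyGetD p (PySem.Int.mod ((xs.length : Int)) (p.length : Int)) 0
           then 1 else 0) := by
  unfold pvScore
  rw [pv_enum_append xs x 0, List.map_append, List.sum_append]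
  simp

-- the loop of A computes exactly the three cyclic scores
lemma pv_loop_eq (xs : List Int) (h : xs.length ≤ 10000) :
    (PySem.List.pyRange 0 (xs.length : Int) 1).foldl
      (fun (s : Int × Int × Int) i =>
        (if PySem.List.pyGetD xs i 0 = PySem.List.pyGetD ((List.replicate 2000 ([1, 2, 3, 4, 5] : List Int)).flatten) i 0 then s.1 + 1 else s.1,
         if PySem.List.pyGetD xs i 0 = PySem.List.pyGetD ((List.replicate 1250 ([2, 1, 2, 3, 2, 4, 2, 5] : List Int)).flatten) i 0 then s.2.1 + 1 else s.2.1,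
         if PySem.List.pyGetD xs i 0 = PySem.List.pyGetD ((List.replicate 1000 ([3, 3, 1, 1, 2, 2, 4, 4, 5, 5] : List Int)).flatten) i 0 then s.2.2 + 1 else s.2.2))
      (0, 0, 0)
    = (pvScore xs [1, 2, 3, 4, 5], pvScore xs [2, 1, 2, 3, 2, 4, 2, 5],
       pvScore xs [3, 3, 1, 1, 2, 2, 4, 4, 5, 5]) := by
  induction xs using List.reverseRecOn with
  | nil =>
    simp only [List.length_nil, Nat.cast_zero]
    rw [PySem.List.pyRange_one_eq_nil le_rfl]
    simp only [List.foldl_nil, pvScore, PySem.List.enumerate_nil, List.map_nil, List.sum_nil]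
  | append_singleton ys y ih =>
    have hlen : ys.length ≤ 10000 := by simp at h; omega
    have hn : ys.length < 10000 := by simp at h; omega
    have hcast : (((ys ++ [y]).length : Nat) : Int) = (ys.length : Int) + 1 := by
      simp
    have hcongr := PySem.List.foldl_congr_mem (PySem.List.pyRange 0 (ys.length : Int) 1)
      (fun (s : Int × Int × Int) i =>
        (if PySem.List.pyGetD (ys ++ [y]) i 0 = PySem.List.pyGetD ((List.replicate 2000 ([1, 2, 3, 4, 5] : List Int)).flatten) i 0 then s.1 + 1 else s.1,
         if PySem.List.pyGetD (ys ++ [y]) i 0 = PySem.List.pyGetD ((List.replicate 1250 ([2, 1, 2, 3, 2, 4, 2, 5] : List Int)).flatten) i 0 then s.2.1 + 1 else s.2.1,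
         if PySem.List.pyGetD (ys ++ [y]) i 0 = PySem.List.pyGetD ((List.replicate 1000 ([3, 3, 1, 1, 2, 2, 4, 4, 5, 5] : List Int)).flatten) i 0 then s.2.2 + 1 else s.2.2))
      (fun (s : Int × Int × Int) i =>
        (if PySem.List.pyGetD ys i 0 = PySem.List.pyGetD ((List.replicate 2000 ([1, 2, 3, 4, 5] : List Int)).flatten) i 0 then s.1 + 1 else s.1,
         if PySem.List.pyGetD ys i 0 = PySem.List.pyGetD ((List.replicate 1250 ([2, 1, 2, 3, 2, 4, 2, 5] : List Int)).flatten) i 0 then s.2.1 + 1 else s.2.1,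
         if PySem.List.pyGetD ys i 0 = PySem.List.pyGetD ((List.replicate 1000 ([3, 3, 1, 1, 2, 2, 4, 4, 5, 5] : List Int)).flatten) i 0 then s.2.2 + 1 else s.2.2))
      ((0, 0, 0) : Int × Int × Int)
      (by
        intro acc i hi
        rw [PySem.List.mem_pyRange_one] at hi
        simp only [pv_getD_append_lt ys y i hi.1 hi.2])
    rw [hcast, PySem.List.pyRange_one_succ_right (by positivity), List.foldl_append, hcongr,
      ih hlen]
    simp only [List.foldl_cons, List.foldl_nil]
    rw [pv_getD_append_last]
    have eA : PySem.List.pyGetD ((List.replicate 2000 ([1, 2, 3, 4, 5] : List Int)).flatten) ((ys.length : Int)) 0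
        = ([1, 2, 3, 4, 5] : List Int).getD (ys.length % 5) 0 := by
      rw [PySem.List.pyGetD_natCast]
      have hl : ([1, 2, 3, 4, 5] : List Int).length = 5 := rfl
      have hf := pv_flat_getD ([1, 2, 3, 4, 5] : List Int) 0 2000 ys.length (by rw [hl]; omega)
      rw [hl] at hf
      exact hf
    have eB : PySem.List.pyGetD ((List.replicate 1250 ([2, 1, 2, 3, 2, 4, 2, 5] : List Int)).flatten) ((ys.length : Int)) 0
        = ([2, 1, 2, 3, 2, 4, 2, 5] : List Int).getD (ys.length % 8) 0 := by
      rw [PySem.List.pyGetD_natCast]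
      have hl : ([2, 1, 2, 3, 2, 4, 2, 5] : List Int).length = 8 := rfl
      have hf := pv_flat_getD ([2, 1, 2, 3, 2, 4, 2, 5] : List Int) 0 1250 ys.length (by rw [hl]; omega)
      rw [hl] at hf
      exact hf
    have eC : PySem.List.pyGetD ((List.replicate 1000 ([3, 3, 1, 1, 2, 2, 4, 4, 5, 5] : List Int)).flatten) ((ys.length : Int)) 0
        = ([3, 3, 1, 1, 2, 2, 4, 4, 5, 5] : List Int).getD (ys.length % 10) 0 := by
      rw [PySem.List.pyGetD_natCast]
      have hl : ([3, 3, 1, 1, 2, 2, 4, 4, 5, 5] : List Int).length = 10 := rfl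
      have hf := pv_flat_getD ([3, 3, 1, 1, 2, 2, 4, 4, 5, 5] : List Int) 0 1000 ys.length (by rw [hl]; omega)
      rw [hl] at hf
      exact hf
    rw [eA, eB, eC, pv_score_append, pv_score_append, pv_score_append]
    have mA : PySem.List.pyGetD ([1, 2, 3, 4, 5] : List Int)
        (PySem.Int.mod ((ys.length : Int)) ((([1, 2, 3, 4, 5] : List Int).length : Nat) : Int)) 0
        = ([1, 2, 3, 4, 5] : List Int).getD (ys.length % 5) 0 := by
      rw [show ((([1, 2, 3, 4, 5] : List Int).length : Nat) : Int) = ((5 : Nat) : Int) from rfl,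
          PySem.Int.mod_natCast, PySem.List.pyGetD_natCast]
    have mB : PySem.List.pyGetD ([2, 1, 2, 3, 2, 4, 2, 5] : List Int)
        (PySem.Int.mod ((ys.length : Int)) ((([2, 1, 2, 3, 2, 4, 2, 5] : List Int).length : Nat) : Int)) 0
        = ([2, 1, 2, 3, 2, 4, 2, 5] : List Int).getD (ys.length % 8) 0 := by
      rw [show ((([2, 1, 2, 3, 2, 4, 2, 5] : List Int).length : Nat) : Int) = ((8 : Nat) : Int) from rfl,
          PySem.Int.mod_natCast, PySem.List.pyGetD_natCast]
    have mC : PySem.List.pyGetD ([3, 3, 1, 1, 2, 2, 4, 4, 5, 5] : List Int)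
        (PySem.Int.mod ((ys.length : Int)) ((([3, 3, 1, 1, 2, 2, 4, 4, 5, 5] : List Int).length : Nat) : Int)) 0
        = ([3, 3, 1, 1, 2, 2, 4, 4, 5, 5] : List Int).getD (ys.length % 10) 0 := by
      rw [show ((([3, 3, 1, 1, 2, 2, 4, 4, 5, 5] : List Int).length : Nat) : Int) = ((10 : Nat) : Int) from rfl,
          PySem.Int.mod_natCast, PySem.List.pyGetD_natCast]
    rw [mA, mB, mC]
    split_ifs <;> simp

-- B's histogram lookup is a count over the (i % 40, v) key list
lemma pv_freq_getD (xs : List Int) (k : Int × Int) :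
    (pvFreq xs).getD k 0
      = (((PySem.List.enumerate xs).map (fun iv => (PySem.Int.mod iv.1 40, iv.2))).count k : Int) := by
  unfold pvFreq
  rw [← List.foldl_map (f := fun iv : Int × Int => ((PySem.Int.mod iv.1 40, iv.2) : Int × Int))
        (g := fun (d : PySem.Dict (Int × Int) Int) k' => d.insert k' (d.getD k' 0 + 1))]
  rw [PySem.Dict.getD_foldl_insert_add_one]
  simp [PySem.Dict.getD_empty]

-- a delta sum over a nodup list containing a
lemma pv_sum_delta (l : List Int) (a c : Int) (hnd : l.Nodup) (ha : a ∈ l) :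
    (l.map (fun r => if r = a then c else 0)).sum = c := by
  induction l with
  | nil => cases ha
  | cons b t ih =>
    rcases List.mem_cons.mp ha with rfl | hat
    · have hz : (t.map (fun r => if r = a then c else 0)).sum = 0 := by
        apply List.sum_eq_zero
        intro y hy
        obtain ⟨r, hr, rfl⟩ := List.mem_map.mp hy
        have : r ≠ a := fun h => (List.nodup_cons.mp hnd).1 (h ▸ hr)
        simp [this]
      rw [List.map_cons, List.sum_cons, if_pos rfl, hz, add_zero]
    · have hba : b ≠ a := fun h => (List.nodup_cons.mp hnd).1 (h ▸ hat)
      simp only [List.map_cons, List.sum_cons, if_neg hba]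
      rw [ih (List.nodup_cons.mp hnd).2 hat]; ring

-- B's histogram score equals the cyclic score, for any pattern whose length divides 40
lemma pv_scoreB_eq (p : List Int) (hdvd : p.length ∣ 40) :
    ∀ xs : List Int, pvScoreB (pvFreq xs) p = pvScore xs p := by
  intro xs
  induction xs using List.reverseRecOn with
  | nil =>
    unfold pvScoreB pvScore
    simp [pv_freq_getD, PySem.List.enumerate_nil]
  | append_singleton ys y ih =>
    unfold pvScoreB at *
    rw [pv_score_append]
    have hkey : ∀ r : Int,
        ((PySem.List.enumerate (ys ++ [y])).map (fun iv => (PySem.Int.mod iv.1 40, iv.2)))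
          = ((PySem.List.enumerate ys).map (fun iv => (PySem.Int.mod iv.1 40, iv.2)))
              ++ [(PySem.Int.mod ((ys.length : Int)) 40, y)] := by
      intro _
      rw [pv_enum_append ys y 0, List.map_append]
      simp
    have hsum : ((PySem.List.pyRange 0 40 1).map
        (fun r => (pvFreq (ys ++ [y])).getD (r, PySem.List.pyGetD p (PySem.Int.mod r (p.length : Int)) 0) 0)).sum
      = ((PySem.List.pyRange 0 40 1).map
          (fun r => (pvFreq ys).getD (r, PySem.List.pyGetD p (PySem.Int.mod r (p.length : Int)) 0) 0)).sum
        + ((PySem.List.pyRange 0 40 1).map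
            (fun r => if (PySem.Int.mod ((ys.length : Int)) 40, y)
                        = (r, PySem.List.pyGetD p (PySem.Int.mod r (p.length : Int)) 0)
                      then (1 : Int) else 0)).sum := by
      rw [← PySem.List.sum_map_add_int]
      apply congrArg
      apply List.map_congr_left
      intro r _
      rw [pv_freq_getD, pv_freq_getD, hkey r, List.count_append]
      push_cast
      congr 1
      simp [List.count_singleton, beq_iff_eq]
    rw [hsum, ih]
    congr 1
    -- the delta sum picks out r = ys.length % 40
    set a : Int := PySem.Int.mod ((ys.length : Int)) 40 with ha
    have haN : a = ((ys.length % 40 : Nat) : Int) := by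
      rw [ha, show (40 : Int) = ((40 : Nat) : Int) by norm_num, PySem.Int.mod_natCast]
    have hmem : a ∈ PySem.List.pyRange 0 40 1 := by
      rw [PySem.List.mem_pyRange_one, haN]
      constructor
      · positivity
      · exact_mod_cast Nat.mod_lt _ (by norm_num)
    have hval : PySem.List.pyGetD p (PySem.Int.mod a (p.length : Int)) 0
        = PySem.List.pyGetD p (PySem.Int.mod ((ys.length : Int)) (p.length : Int)) 0 := by
      rw [haN, PySem.Int.mod_natCast, PySem.Int.mod_natCast,
        Nat.mod_mod_of_dvd _ hdvd]
    have hcongr2 : (PySem.List.pyRange 0 40 1).map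
          (fun r => if (a, y) = (r, PySem.List.pyGetD p (PySem.Int.mod r (p.length : Int)) 0)
                    then (1 : Int) else 0)
        = (PySem.List.pyRange 0 40 1).map
            (fun r => if r = a
                      then (if y = PySem.List.pyGetD p (PySem.Int.mod ((ys.length : Int)) (p.length : Int)) 0
                            then (1 : Int) else 0)
                      else 0) := by
      apply List.map_congr_left
      intro r _
      by_cases hr : r = a
      · rw [hr, hval]
        simp [Prod.ext_iff]
      · rw [if_neg (fun h => hr ((Prod.ext_iff.mp h).1.symm)), if_neg hr]
    rw [hcongr2, pv_sum_delta _ _ _ (PySem.List.nodup_pyRange_one 0 40) hmem]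

-- the selection step: max/filter over the 3-element scores list = A's if-chain
lemma pv_select (s1 s2 s3 : Int) :
    (PySem.List.enumerate ([s1, s2, s3] : List Int)).filterMap
        (fun is => if is.2 = ((PySem.List.max? ([s1, s2, s3] : List Int) id).getD 0)
                   then some (is.1 + 1) else none)
      = (if max s1 (max s2 s3) = s1 then [1] else [])
          ++ (if max s1 (max s2 s3) = s2 then [2] else [])
          ++ (if max s1 (max s2 s3) = s3 then [3] else []) := by
  have hbest : ((PySem.List.max? ([s1, s2, s3] : List Int) id).getD 0) = max s1 (max s2 s3) := by
    simp only [PySem.List.max?, List.foldl_cons, List.foldl_nil, id_eq]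
    by_cases h1 : s1 < s2
    · simp only [if_pos h1]
      by_cases h2 : s2 < s3 <;> simp [h2] <;> omega
    · simp only [if_neg h1]
      by_cases h2 : s1 < s3 <;> simp [h2] <;> omega
  rw [hbest]
  simp only [PySem.List.enumerate_cons, PySem.List.enumerate_nil, List.filterMap_cons,
    List.filterMap_nil]
  split_ifs <;> first | (exfalso; omega) | simp

-- ===== VERDICT (by name: the statement is the Claim_ definition above) =====
theorem solution_spec : Claim_equal_solution := by
  intro answers _ hpre
  unfold Spec_solution
  unfold Pre_solution at hpre
  unfold solution solution_alt
  simp only [List.map_cons, List.map_nil]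
  have e5 : (PySem.Int.floordiv 10000 (([1, 2, 3, 4, 5] : List Int).length : Int)).toNat = 2000 := by decide
  have e8 : (PySem.Int.floordiv 10000 (([2, 1, 2, 3, 2, 4, 2, 5] : List Int).length : Int)).toNat = 1250 := by decide
  have e10 : (PySem.Int.floordiv 10000 (([3, 3, 1, 1, 2, 2, 4, 4, 5, 5] : List Int).length : Int)).toNat = 1000 := by decide
  rw [e5, e8, e10, pv_loop_eq answers hpre]
  simp only [pv_scoreB_eq [1, 2, 3, 4, 5] (by norm_num),
    pv_scoreB_eq [2, 1, 2, 3, 2, 4, 2, 5] (by norm_num),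
    pv_scoreB_eq [3, 3, 1, 1, 2, 2, 4, 4, 5, 5] (by norm_num)]
  exact (pv_select (pvScore answers [1, 2, 3, 4, 5]) (pvScore answers [2, 1, 2, 3, 2, 4, 2, 5])
    (pvScore answers [3, 3, 1, 1, 2, 2, 4, 4, 5, 5])).symm
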